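-- pv_equiv track=rewrite | github.com/sanjaysoni5657/Pramp | Busiest Time In Mall/BusiestTimeInMall.py | find_busiest_period
-- ===== SOURCE A (Python) =====
-- def find_busiest_period(data):
--
--   shoppers = 0
--   max_shoppers = 0
--   for i in range(len(data)):
--     if data[i][2] == 1:
--       shoppers += data[i][1]
--     else:
--       shoppers -= data[i][1]
--
--     if i == len(data) - 1 or data[i][0] != data[i+1][0]:
--       if max_shoppers < shoppers:
--         max_shoppers = shoppers
--         busiest_time = data[i][0]
--   return busiest_time
-- ===== SOURCE B (Python) =====
-- def find_busiest_period(data):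
--     # Phase 1: group consecutive events by timestamp, recording the cumulative
--     # shopper count at the end of each timestamp group.
--     totals = []
--     running = 0
--     rest = data
--     while rest:
--         ts = rest[0][0]
--         while rest and rest[0][0] == ts:
--             e = rest[0]
--             running += e[1] if e[2] == 1 else -e[1]
--             rest = rest[1:]
--         totals.append((ts, running))
--     # Phase 2: the busiest time is the first timestamp achieving the maximum
--     # (positive) cumulative count.
--     best = max(t for _, t in totals if t > 0)
--     return next(ts for ts, t in totals if t == best)
-- ===== Notes on version B (the rewrite author's own statement) =====
-- stated objective: alternative
-- what changed: B is a two-phase decomposition: it first groups consecutive events by timestamp into a list of (timestamp, cumulative shopper total) pairs, then returns the first timestamp achieving the maximum positive total via max()+next(), instead of A's single pass with a per-event boundary test and strict running-max update.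
import Mathlib
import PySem

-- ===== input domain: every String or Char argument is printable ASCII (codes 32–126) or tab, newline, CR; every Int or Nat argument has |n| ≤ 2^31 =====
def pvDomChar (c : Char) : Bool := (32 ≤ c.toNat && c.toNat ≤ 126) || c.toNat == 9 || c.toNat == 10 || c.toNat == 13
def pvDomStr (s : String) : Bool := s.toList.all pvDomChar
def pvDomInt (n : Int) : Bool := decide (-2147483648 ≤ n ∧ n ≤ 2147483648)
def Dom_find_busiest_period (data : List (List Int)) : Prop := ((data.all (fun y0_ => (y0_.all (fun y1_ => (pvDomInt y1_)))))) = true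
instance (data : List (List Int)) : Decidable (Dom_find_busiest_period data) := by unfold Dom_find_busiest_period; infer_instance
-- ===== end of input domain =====

-- B replaces A's per-event strict-max update by a two-phase decomposition: group
-- consecutive events by timestamp into (timestamp, cumulative total) pairs, then
-- return the first timestamp achieving the maximum positive total (objective: alternative).

-- ===== PORT A =====
-- e[j] for the literal non-negative indices 0,1,2; exact under Pre_ (rows have length ≥ 3)
def pvItem (e : List Int) (j : Int) : Int := PySem.List.pyGetD e j 0

-- the for-loop of A: state (shoppers, max_shoppers, busiest); data[i+1] is the head of the rest
def aLoop : List (List Int) → Int → Int → Option Int → Option Int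
  | [], _, _, busiest => busiest
  | e :: rest, shoppers, maxS, busiest =>
    let shoppers' := if pvItem e 2 = 1 then shoppers + pvItem e 1 else shoppers - pvItem e 1
    if rest = [] ∨ pvItem e 0 ≠ pvItem (rest.headD []) 0 then
      if maxS < shoppers' then aLoop rest shoppers' shoppers' (some (pvItem e 0))
      else aLoop rest shoppers' maxS busiest
    else aLoop rest shoppers' maxS busiest

-- Python returns busiest_time (unbound → UnboundLocalError, excluded by Pre_; getD 0 never used there)
def find_busiest_period (data : List (List Int)) : Int := (aLoop data 0 0 none).getD 0

-- ===== PORT B =====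
def pvDelta (e : List Int) : Int := if pvItem e 2 = 1 then pvItem e 1 else -(pvItem e 1)

-- the inner while-loop of B: consume events with timestamp ts, accumulating running
def bInner (ts : Int) : Int → List (List Int) → Int × List (List Int)
  | running, [] => (running, [])
  | running, e :: rest =>
    if pvItem e 0 = ts then bInner ts (running + pvDelta e) rest else (running, e :: rest)

theorem bInner_len (ts : Int) : ∀ (l : List (List Int)) (running : Int),
    (bInner ts running l).2.length ≤ l.length := by
  intro l
  induction l with
  | nil => intro r; simp [bInner]
  | cons e rest ih =>
    intro r
    simp only [bInner]
    split
    · exact le_trans (ih _) (Nat.le_succ _)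
    · simp

-- the outer while-loop of B: one (timestamp, cumulative total) pair per group
def bOuter : Int → List (List Int) → List (Int × Int)
  | _, [] => []
  | running, e :: rest =>
    let p := bInner (pvItem e 0) (running + pvDelta e) rest
    (pvItem e 0, p.1) :: bOuter p.1 p.2
termination_by _ l => l.length
decreasing_by
  have := bInner_len (pvItem e 0) rest (running + pvDelta e)
  simp only [List.length_cons]
  omega

def find_busiest_period_alt (data : List (List Int)) : Int :=
  let totals := bOuter 0 data
  -- best = max(t for _, t in totals if t > 0); ValueError on empty → outside Pre_, return 0
  match PySem.List.max? ((totals.map Prod.snd).filter (fun t => decide (0 < t))) (fun t => t) with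
  | none => 0
  | some best =>
    -- next(ts for ts, t in totals if t == best)
    match totals.find? (fun p => p.2 == best) with
    | some p => p.1
    | none => 0

-- ===== PRECONDITION & SPEC =====
-- Pre-side row access / delta / prefix sums, written with plain List.getD (closed form)
def pvDeltaP (e : List Int) : Int := if e.getD 2 0 = 1 then e.getD 1 0 else -(e.getD 1 0)
def pvPrefixP (data : List (List Int)) (k : Nat) : Int := ((data.take k).map pvDeltaP).sum
def pvTsAt (data : List (List Int)) (i : Nat) : Int := (data.getD i []).getD 0 0

-- A raises IndexError when some row has fewer than 3 entries, and UnboundLocalError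
-- (busiest_time never assigned) when no timestamp-group boundary has a positive running
-- total; B raises there too (IndexError / ValueError), so exactly those inputs are excluded.
def Pre_find_busiest_period (data : List (List Int)) : Prop :=
  (∀ e ∈ data, 3 ≤ e.length) ∧
  ∃ i, i < data.length ∧
    (i + 1 = data.length ∨ pvTsAt data i ≠ pvTsAt data (i + 1)) ∧
    0 < pvPrefixP data (i + 1)

instance (data : List (List Int)) : Decidable (Pre_find_busiest_period data) := by
  unfold Pre_find_busiest_period; infer_instance

def pvWitness_find_busiest_period : List (List Int) := [[1, 5, 1], [1, 2, 0], [2, 10, 1]]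

def Spec_find_busiest_period (data : List (List Int)) (out : Int) : Prop := out = find_busiest_period_alt data
instance (data : List (List Int)) (out : Int) : Decidable (Spec_find_busiest_period data out) := by unfold Spec_find_busiest_period; infer_instance

-- ===== CLAIM (what is proved, stated in full; the proofs are below) =====
def Claim_equal_find_busiest_period : Prop := ∀ (data : List (List Int)), Dom_find_busiest_period data → Pre_find_busiest_period data → Spec_find_busiest_period data (find_busiest_period data)

-- ===== LEMMAS AND PROOFS =====

theorem pvItem_zero (e : List Int) : pvItem e 0 = e.getD 0 0 := by
  simp only [pvItem, PySem.List.pyGetD, PySem.List.pyGet?, PySem.List.pyIdx?, List.getD]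
  split
  · split
    · simp
    · rw [List.getElem?_eq_none (by omega)]
      simp
  · omega

theorem pvItem_one (e : List Int) : pvItem e 1 = e.getD 1 0 := by
  simp only [pvItem, PySem.List.pyGetD, PySem.List.pyGet?, PySem.List.pyIdx?, List.getD]
  split
  · split
    · simp
    · rw [List.getElem?_eq_none (by omega)]
      simp
  · omega

theorem pvItem_two (e : List Int) : pvItem e 2 = e.getD 2 0 := by
  simp only [pvItem, PySem.List.pyGetD, PySem.List.pyGet?, PySem.List.pyIdx?, List.getD]
  split
  · split
    · simp
    · rw [List.getElem?_eq_none (by omega)]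
      simp
  · omega

theorem pvDelta_eq (e : List Int) : pvDelta e = pvDeltaP e := by
  simp [pvDelta, pvDeltaP, pvItem_one, pvItem_two]

-- the strict-max scan that A's loop performs over the group totals
def scanMax : List (Int × Int) → Int → Option Int → Option Int
  | [], _, b => b
  | (ts, t) :: rest, m, b => if m < t then scanMax rest t (some ts) else scanMax rest m b

theorem bOuter_cons_diff (s : Int) (e : List Int) (rest : List (List Int))
    (h : rest = [] ∨ pvItem (rest.headD []) 0 ≠ pvItem e 0) :
    bOuter s (e :: rest) = (pvItem e 0, s + pvDelta e) :: bOuter (s + pvDelta e) rest := by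
  cases rest with
  | nil => simp [bOuter, bInner]
  | cons e' rest' =>
    rcases h with h | h
    · cases h
    · simp only [List.headD_cons] at h
      simp [bOuter, bInner, h]

theorem bOuter_cons_same (s : Int) (e e' : List Int) (rest' : List (List Int))
    (h : pvItem e' 0 = pvItem e 0) :
    bOuter s (e :: e' :: rest') = bOuter (s + pvDelta e) (e' :: rest') := by
  simp [bOuter, bInner, h]

theorem aLoop_eq_scanMax : ∀ (l : List (List Int)) (s m : Int) (b : Option Int),
    aLoop l s m b = scanMax (bOuter s l) m b := by
  intro l
  induction l with
  | nil => intro s m b; simp [aLoop, bOuter, scanMax]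
  | cons e rest ih =>
    intro s m b
    have hs : (if pvItem e 2 = 1 then s + pvItem e 1 else s - pvItem e 1) = s + pvDelta e := by
      simp only [pvDelta]; split <;> ring
    by_cases hb : rest = [] ∨ pvItem e 0 ≠ pvItem (rest.headD []) 0
    · have hb' : rest = [] ∨ pvItem (rest.headD []) 0 ≠ pvItem e 0 := by
        rcases hb with h | h
        · exact Or.inl h
        · exact Or.inr (fun hh => h hh.symm)
      rw [bOuter_cons_diff s e rest hb']
      simp only [aLoop, hs, if_pos hb, scanMax]
      split <;> [exact ih _ _ _; exact ih _ _ _]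
    · push Not at hb
      obtain ⟨hne, heq⟩ := hb
      cases rest with
      | nil => exact absurd rfl hne
      | cons e' rest' =>
        simp only [List.headD_cons] at heq
        rw [bOuter_cons_same s e e' rest' heq.symm]
        simp only [aLoop, hs]
        rw [if_neg (by push Not; exact ⟨by simp, by simpa using heq⟩)]
        exact ih _ _ _

theorem scanMax_stay : ∀ (l : List (Int × Int)) (m : Int) (b : Option Int),
    (∀ p ∈ l, p.2 ≤ m) → scanMax l m b = b := by
  intro l
  induction l with
  | nil => intro m b _; rfl
  | cons p rest ih =>
    intro m b h
    obtain ⟨ts, t⟩ := p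
    have ht : t ≤ m := h (ts, t) (List.mem_cons_self ..)
    simp only [scanMax, if_neg (not_lt.mpr ht)]
    exact ih m b (fun q hq => h q (List.mem_cons_of_mem _ hq))

theorem scanMax_find (best : Int) :
    ∀ (l : List (Int × Int)) (m : Int) (b : Option Int),
    m < best → (∀ p ∈ l, p.2 ≤ best) → (∃ p ∈ l, p.2 = best) →
    scanMax l m b = Option.map Prod.fst (l.find? (fun p => p.2 == best)) := by
  intro l
  induction l with
  | nil => intro m b _ _ hex; simp at hex
  | cons p rest ih =>
    intro m b hm hle hex
    obtain ⟨ts, t⟩ := p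
    by_cases ht : t = best
    · subst ht
      simp only [scanMax, if_pos hm, List.find?_cons, beq_self_eq_true, Option.map_some]
      exact scanMax_stay rest t (some ts) (fun q hq => hle q (List.mem_cons_of_mem _ hq))
    · have htle : t ≤ best := hle (ts, t) (List.mem_cons_self ..)
      have htlt : t < best := lt_of_le_of_ne htle ht
      have hex' : ∃ p ∈ rest, p.2 = best := by
        rcases hex with ⟨q, hq, hqv⟩
        rcases List.mem_cons.mp hq with h | h
        · exact absurd (by rw [h] at hqv; exact hqv) ht
        · exact ⟨q, h, hqv⟩
      have hle' : ∀ p ∈ rest, p.2 ≤ best := fun q hq => hle q (List.mem_cons_of_mem _ hq)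
      have hfind : ((ts, t) :: rest).find? (fun p => p.2 == best) = rest.find? (fun p => p.2 == best) := by
        simp [ht]
      rw [hfind]
      simp only [scanMax]
      split
      · exact ih t (some ts) htlt hle' hex'
      · exact ih m b hm hle' hex'

-- each group boundary's cumulative total occurs in bOuter's output
theorem bOuter_mem_prefix : ∀ (data : List (List Int)) (s : Int) (i : Nat),
    i < data.length →
    (i + 1 = data.length ∨ pvTsAt data i ≠ pvTsAt data (i + 1)) →
    ∃ p ∈ bOuter s data, p.2 = s + pvPrefixP data (i + 1) := by
  intro data
  induction data with
  | nil => intro s i h; simp at h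
  | cons e rest ih =>
    intro s i hi hbd
    cases i with
    | zero =>
      have hδ : pvPrefixP (e :: rest) 1 = pvDeltaP e := by
        simp [pvPrefixP]
      cases rest with
      | nil =>
        refine ⟨(pvItem e 0, s + pvDelta e), ?_, ?_⟩
        · rw [bOuter_cons_diff s e [] (Or.inl rfl)]; exact List.mem_cons_self ..
        · simp [hδ, pvDelta_eq]
      | cons e' rest' =>
        have hne : pvTsAt (e :: e' :: rest') 0 ≠ pvTsAt (e :: e' :: rest') 1 := by
          rcases hbd with h | h
          · simp at h
          · exact h
        have hne' : pvItem ((e' :: rest').headD []) 0 ≠ pvItem e 0 := by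
          simp only [List.headD_cons, pvItem_zero]
          simpa [pvTsAt] using fun hh => hne (by simp [pvTsAt, hh])
        refine ⟨(pvItem e 0, s + pvDelta e), ?_, ?_⟩
        · rw [bOuter_cons_diff s e (e' :: rest') (Or.inr hne')]; exact List.mem_cons_self ..
        · simp [hδ, pvDelta_eq]
    | succ j =>
      have hj : j < rest.length := by simpa using hi
      have hbd' : j + 1 = rest.length ∨ pvTsAt rest j ≠ pvTsAt rest (j + 1) := by
        rcases hbd with h | h
        · left; simpa using h
        · right; simpa [pvTsAt] using h
      have hpre : pvPrefixP (e :: rest) (j + 2) = pvDeltaP e + pvPrefixP rest (j + 1) := by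
        simp [pvPrefixP, List.take_succ_cons]
      by_cases hts : pvItem ((rest).headD []) 0 = pvItem e 0
      · cases rest with
        | nil => simp at hj
        | cons e' rest' =>
          rw [bOuter_cons_same s e e' rest' (by simpa using hts)]
          obtain ⟨p, hp, hpv⟩ := ih (s + pvDelta e) j hj hbd'
          refine ⟨p, hp, ?_⟩
          rw [hpv, hpre, pvDelta_eq]; ring
      · rw [bOuter_cons_diff s e rest (by
          cases rest with
          | nil => exact Or.inl rfl
          | cons e' rest' => exact Or.inr hts)]
        obtain ⟨p, hp, hpv⟩ := ih (s + pvDelta e) j hj hbd'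
        refine ⟨p, List.mem_cons_of_mem _ hp, ?_⟩
        rw [hpv, hpre, pvDelta_eq]; ring

-- ===== VERDICT (by name: the statement is the Claim_ definition above) =====
theorem find_busiest_period_spec : Claim_equal_find_busiest_period := by
  intro data _ hpre
  obtain ⟨_, i, hi, hbd, hpos⟩ := hpre
  unfold Spec_find_busiest_period find_busiest_period
  rw [aLoop_eq_scanMax]
  -- some group total is positive
  obtain ⟨p₀, hp₀, hp₀v⟩ := bOuter_mem_prefix data 0 i hi hbd
  have hp₀pos : 0 < p₀.2 := by rw [hp₀v]; simpa using hpos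
  -- hence the filtered list is nonempty and max? returns some best
  have hmem : p₀.2 ∈ ((bOuter 0 data).map Prod.snd).filter (fun t => decide (0 < t)) := by
    apply List.mem_filter.mpr
    exact ⟨List.mem_map.mpr ⟨p₀, hp₀, rfl⟩, by simpa using hp₀pos⟩
  have hne : ((bOuter 0 data).map Prod.snd).filter (fun t => decide (0 < t)) ≠ [] := by
    intro h; rw [h] at hmem; simp at hmem
  obtain ⟨best, hbest⟩ : ∃ b, PySem.List.max? (((bOuter 0 data).map Prod.snd).filter (fun t => decide (0 < t))) (fun t => t) = some b := by
    cases hmax : PySem.List.max? (((bOuter 0 data).map Prod.snd).filter (fun t => decide (0 < t))) (fun t => t) with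
    | none => exact absurd ((PySem.List.max?_eq_none_iff _ _).mp hmax) hne
    | some b => exact ⟨b, rfl⟩
  have hbmem := PySem.List.max?_mem hbest
  have hbmax := PySem.List.max?_isMax hbest
  have hbpos : 0 < best := by
    have := List.mem_filter.mp hbmem
    simpa using this.2
  have hle : ∀ p ∈ bOuter 0 data, p.2 ≤ best := by
    intro p hp
    by_cases h : 0 < p.2
    · exact hbmax p.2 (List.mem_filter.mpr ⟨List.mem_map.mpr ⟨p, hp, rfl⟩, by simpa using h⟩)
    · omega
  have hex : ∃ p ∈ bOuter 0 data, p.2 = best := by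
    have := (List.mem_filter.mp hbmem).1
    obtain ⟨p, hp, hpv⟩ := List.mem_map.mp this
    exact ⟨p, hp, hpv⟩
  have hfind : ∃ q, (bOuter 0 data).find? (fun p => p.2 == best) = some q := by
    have : ((bOuter 0 data).find? (fun p => p.2 == best)).isSome := by
      rw [List.find?_isSome]
      obtain ⟨p, hp, hpv⟩ := hex
      exact ⟨p, hp, by simpa using hpv⟩
    exact Option.isSome_iff_exists.mp this
  obtain ⟨q, hq⟩ := hfind
  have halt : find_busiest_period_alt data = q.1 := by
    simp only [find_busiest_period_alt, hbest, hq]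
  rw [scanMax_find best (bOuter 0 data) 0 none hbpos hle hex, hq, halt]
  simp
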